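-- pv_equiv track=rewrite | github.com/dmshvetsov/adventofcode | 2020/01/2.py | solution
-- ===== SOURCE A (Python) =====
-- def solution(data, result=2020):
--     data.sort()
--
--     for bidx, base in enumerate(data):
--         rem = 2020 - base
--         lidx = bidx + 1
--         ridx = len(data) - 1
--         while (lidx < ridx):
--             if data[lidx] + data[ridx] == rem:
--                 return base * data[lidx] * data[ridx]
--             if data[lidx] + data[ridx] > rem:
--                 ridx -= 1
--             else:
--                 lidx += 1
-- ===== SOURCE B (Python) =====
-- def solution(data, result=2020):
--     # Same task as A: sort data in place (same observable mutation), then for each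
--     # base in ascending order find the first j whose complement exists later in the
--     # list, using a count dict of the suffix instead of A's two-pointer scan.
--     data.sort()
--     n = len(data)
--     for i in range(n):
--         need = 2020 - data[i]
--         counts = {}
--         for x in data[i + 1:]:
--             counts[x] = counts.get(x, 0) + 1
--         for j in range(i + 1, n):
--             counts[data[j]] = counts[data[j]] - 1
--             c = need - data[j]
--             if counts.get(c, 0) > 0:
--                 return data[i] * data[j] * c
-- ===== Notes on version B (the rewrite author's own statement) =====
-- stated objective: alternative
-- what changed: Replaces A's per-base two-pointer scan over the sorted list with, for each base, a complement-count dict of the suffix that is decremented while scanning j, returning base*data[j]*(2020-base-data[j]) at the first j whose complement remains in the suffix.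
import Mathlib
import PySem

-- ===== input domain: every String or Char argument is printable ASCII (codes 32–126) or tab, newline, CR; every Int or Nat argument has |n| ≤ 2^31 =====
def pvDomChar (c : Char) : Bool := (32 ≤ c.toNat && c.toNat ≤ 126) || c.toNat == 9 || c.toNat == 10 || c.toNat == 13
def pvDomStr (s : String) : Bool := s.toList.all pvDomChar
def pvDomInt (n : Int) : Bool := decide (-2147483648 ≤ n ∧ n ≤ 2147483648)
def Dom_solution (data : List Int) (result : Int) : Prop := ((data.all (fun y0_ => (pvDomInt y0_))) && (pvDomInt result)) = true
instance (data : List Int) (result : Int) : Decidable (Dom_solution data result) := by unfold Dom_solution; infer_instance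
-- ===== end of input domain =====

-- B replaces A's per-base two-pointer scan by a complement-count dict of the suffix (alternative
-- algorithm, same O(n^2) cost). Both A and B sort `data` in place (same observable mutation);
-- the equivalence proved here is about the return value.

-- ===== PORT A =====
-- inner `while lidx < ridx` loop of A (two-pointer scan); `base`/`rem` are the loop-invariant values
def twoPtrA (d : List Int) (base rem : Int) (l r : Nat) : Option Int :=
  if h : l < r then
    if d.getD l 0 + d.getD r 0 = rem then some (base * d.getD l 0 * d.getD r 0)
    else if d.getD l 0 + d.getD r 0 > rem then twoPtrA d base rem l (r - 1)
    else twoPtrA d base rem (l + 1) r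
  else none
termination_by r - l
decreasing_by all_goals omega

-- outer `for bidx, base in enumerate(data)` loop of A
def outerA (d : List Int) (i : Nat) : Option Int :=
  if h : i < d.length then
    match twoPtrA d (d.getD i 0) (2020 - d.getD i 0) (i + 1) (d.length - 1) with
    | some p => some p
    | none => outerA d (i + 1)
  else none
termination_by d.length - i
decreasing_by omega

def solution (data : List Int) (result : Int) : Option Int :=
  -- data.sort() : the rest of A reads only the sorted list
  outerA (PySem.List.sorted data (fun x => x)) 0

-- ===== PORT B =====
-- inner `for j in range(i+1, n)` loop of B, carrying the count dict of the suffix d[j:]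
def loopJB (d : List Int) (i j : Nat) (counts : PySem.Dict Int Int) : Option Int :=
  if h : j < d.length then
    let counts' := counts.insert (d.getD j 0) (counts.getD (d.getD j 0) 0 - 1)
    let c := (2020 - d.getD i 0) - d.getD j 0
    if counts'.getD c 0 > 0 then some (d.getD i 0 * d.getD j 0 * c)
    else loopJB d i (j + 1) counts'
  else none
termination_by d.length - j
decreasing_by omega

-- outer `for i in range(n)` loop of B; `data[i+1:]` (nonneg start) is `d.drop (i+1)`, exact here
def loopIB (d : List Int) (i : Nat) : Option Int :=
  if h : i < d.length then
    match loopJB d i (i + 1)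
        ((d.drop (i + 1)).foldl (fun cnt x => cnt.insert x (cnt.getD x 0 + 1)) PySem.Dict.empty) with
    | some p => some p
    | none => loopIB d (i + 1)
  else none
termination_by d.length - i
decreasing_by omega

def solution_alt (data : List Int) (result : Int) : Option Int :=
  loopIB (PySem.List.sorted data (fun x => x)) 0

-- ===== PRECONDITION & SPEC =====
def Spec_solution (data : List Int) (result : Int) (out : Option Int) : Prop := out = solution_alt data result
instance (data : List Int) (result : Int) (out : Option Int) : Decidable (Spec_solution data result out) := by unfold Spec_solution; infer_instance

-- ===== CLAIM (what is proved, stated in full; the proofs are below) =====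
def Claim_equal_solution : Prop := ∀ (data : List Int) (result : Int), Dom_solution data result → Spec_solution data result (solution data result)

-- ===== LEMMAS AND PROOFS =====

-- Common specification of both inner loops: scan j upward; at the first j (j < r) whose
-- complement rem - d[j] occurs among d[j+1..r], return base * d[j] * (rem - d[j]).
def lexJ (d : List Int) (base rem : Int) (j r : Nat) : Option Int :=
  if h : j < r then
    if (rem - d.getD j 0) ∈ (d.take (r + 1)).drop (j + 1) then
      some (base * d.getD j 0 * (rem - d.getD j 0))
    else lexJ d base rem (j + 1) r
  else none
termination_by r - j
decreasing_by omega

lemma mem_window {d : List Int} {v : Int} {j r : Nat} (hr : r < d.length) :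
    v ∈ (d.take (r + 1)).drop (j + 1) ↔ ∃ k, j + 1 ≤ k ∧ k ≤ r ∧ d.getD k 0 = v := by
  rw [List.mem_iff_getElem]
  constructor
  · rintro ⟨m, hm, he⟩
    refine ⟨j + 1 + m, by omega, ?_, ?_⟩
    · simp [List.length_drop, List.length_take] at hm; omega
    · have hm' : j + 1 + m < d.length := by
        simp [List.length_drop, List.length_take] at hm; omega
      rw [List.getD_eq_getElem d 0 hm']
      simpa [List.getElem_drop, List.getElem_take] using he
  · rintro ⟨k, h1, h2, h3⟩
    have hk : k < d.length := by omega
    refine ⟨k - (j + 1), by simp [List.length_drop, List.length_take]; omega, ?_⟩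
    rw [List.getD_eq_getElem d 0 hk] at h3
    simpa [List.getElem_drop, List.getElem_take, Nat.add_sub_cancel' h1] using h3

lemma getD_mono {d : List Int} (hs : List.Pairwise (· ≤ ·) d) {a b : Nat}
    (hab : a ≤ b) (hb : b < d.length) : d.getD a 0 ≤ d.getD b 0 := by
  rcases Nat.eq_or_lt_of_le hab with h | h
  · subst h; rfl
  · have ha : a < d.length := by omega
    rw [List.getD_eq_getElem d 0 ha, List.getD_eq_getElem d 0 hb]
    exact List.pairwise_iff_getElem.1 hs a b ha hb h

lemma lexJ_shrink {d : List Int} {base rem : Int} {r : Nat} (hrlen : r < d.length) :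
    ∀ fuel l, r - l ≤ fuel → (∀ jj, l ≤ jj → jj < r → d.getD jj 0 + d.getD r 0 ≠ rem) →
      lexJ d base rem l r = lexJ d base rem l (r - 1) := by
  intro fuel
  induction fuel with
  | zero =>
    intro l hl _
    conv_lhs => rw [lexJ.eq_def]
    conv_rhs => rw [lexJ.eq_def]
    rw [dif_neg (by omega : ¬ l < r), dif_neg (by omega : ¬ l < r - 1)]
  | succ f ih =>
    intro l hl hnm
    conv_lhs => rw [lexJ.eq_def]
    conv_rhs => rw [lexJ.eq_def]
    by_cases hlr : l < r
    · have hrl1 : r - 1 < d.length := by omega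
      have hne : d.getD r 0 ≠ rem - d.getD l 0 := fun h => hnm l le_rfl hlr (by omega)
      by_cases hl1 : l < r - 1
      · rw [dif_pos hlr, dif_pos hl1]
        have hcond : ((rem - d.getD l 0) ∈ (d.take (r + 1)).drop (l + 1)) ↔
            ((rem - d.getD l 0) ∈ (d.take (r - 1 + 1)).drop (l + 1)) := by
          rw [mem_window hrlen, mem_window hrl1]
          constructor
          · rintro ⟨k, h1, h2, h3⟩
            rcases Nat.eq_or_lt_of_le h2 with he | hlt
            · exact absurd (he ▸ h3) hne
            · exact ⟨k, h1, by omega, h3⟩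
          · rintro ⟨k, h1, h2, h3⟩; exact ⟨k, h1, by omega, h3⟩
        by_cases hc : (rem - d.getD l 0) ∈ (d.take (r - 1 + 1)).drop (l + 1)
        · rw [if_pos (hcond.2 hc), if_pos hc]
        · rw [if_neg (fun h => hc (hcond.1 h)), if_neg hc]
          exact ih (l + 1) (by omega) (fun jj h1 h2 => hnm jj (by omega) h2)
      · -- l = r - 1
        have hl' : l = r - 1 := by omega
        rw [dif_pos hlr, dif_neg hl1]
        have hc : ¬ (rem - d.getD l 0) ∈ (d.take (r + 1)).drop (l + 1) := by
          rw [mem_window hrlen]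
          rintro ⟨k, h1, h2, h3⟩
          have : k = r := by omega
          exact hne (this ▸ h3)
        rw [if_neg hc]
        conv_lhs => rw [lexJ.eq_def]
        rw [dif_neg (by omega : ¬ l + 1 < r)]
    · rw [dif_neg hlr, dif_neg (by omega)]

lemma twoPtr_eq_lexJ {d : List Int} (hs : List.Pairwise (· ≤ ·) d) (base rem : Int) :
    ∀ fuel l r, r - l ≤ fuel → r < d.length →
      twoPtrA d base rem l r = lexJ d base rem l r := by
  intro fuel
  induction fuel with
  | zero =>
    intro l r hf hr
    conv_lhs => rw [twoPtrA.eq_def]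
    conv_rhs => rw [lexJ.eq_def]
    rw [dif_neg (by omega : ¬ l < r), dif_neg (by omega : ¬ l < r)]
  | succ f ih =>
    intro l r hf hr
    conv_lhs => rw [twoPtrA.eq_def]
    by_cases hlr : l < r
    · rw [dif_pos hlr]
      by_cases heq : d.getD l 0 + d.getD r 0 = rem
      · rw [if_pos heq]
        conv_rhs => rw [lexJ.eq_def]
        rw [dif_pos hlr]
        have hv : rem - d.getD l 0 = d.getD r 0 := by omega
        rw [if_pos (by rw [mem_window hr]; exact ⟨r, by omega, le_rfl, hv.symm⟩), hv]
      · rw [if_neg heq]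
        by_cases hgt : d.getD l 0 + d.getD r 0 > rem
        · rw [if_pos hgt]
          have h1 : twoPtrA d base rem l (r - 1) = lexJ d base rem l (r - 1) :=
            ih l (r - 1) (by omega) (by omega)
          have h2 : lexJ d base rem l r = lexJ d base rem l (r - 1) := by
            refine lexJ_shrink hr (r - l) l le_rfl ?_
            intro jj hj1 hj2 hc
            have := getD_mono hs hj1 (by omega : jj < d.length)
            omega
          rw [h1, ← h2]
        · rw [if_neg hgt]
          have hlt : d.getD l 0 + d.getD r 0 < rem := by omega
          have hc : ¬ (rem - d.getD l 0) ∈ (d.take (r + 1)).drop (l + 1) := by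
            rw [mem_window hr]
            rintro ⟨k, hk1, hk2, hk3⟩
            have := getD_mono hs hk2 hr
            omega
          conv_rhs => rw [lexJ.eq_def]
          rw [dif_pos hlr, if_neg hc]
          exact ih (l + 1) r (by omega) hr
    · rw [dif_neg hlr]
      conv_rhs => rw [lexJ.eq_def]
      rw [dif_neg hlr]

lemma loopJB_eq_lexJ {d : List Int} (i : Nat) :
    ∀ fuel j counts, d.length - j ≤ fuel →
      (∀ v : Int, counts.getD v 0 = ((d.drop j).count v : Int)) →
      loopJB d i j counts = lexJ d (d.getD i 0) (2020 - d.getD i 0) j (d.length - 1) := by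
  intro fuel
  induction fuel with
  | zero =>
    intro j counts hf _
    rw [loopJB.eq_def, lexJ.eq_def,
      dif_neg (by omega : ¬ j < d.length), dif_neg (by omega : ¬ j < d.length - 1)]
  | succ f ih =>
    intro j counts hf hinv
    by_cases hj : j < d.length
    · rw [loopJB.eq_def]
      simp only [dif_pos hj]
      have hdrop : d.drop j = d.getD j 0 :: d.drop (j + 1) := by
        rw [List.getD_eq_getElem d 0 hj]; exact List.drop_eq_getElem_cons hj
      have hinv' : ∀ v : Int,
          (counts.insert (d.getD j 0) (counts.getD (d.getD j 0) 0 - 1)).getD v 0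
            = ((d.drop (j + 1)).count v : Int) := by
        intro v
        rw [PySem.Dict.getD_insert]
        by_cases hv : v = d.getD j 0
        · rw [if_pos hv, hinv, hdrop, hv, List.count_cons_self]
          push_cast; omega
        · rw [if_neg hv, hinv, hdrop, List.count_cons_of_ne (Ne.symm hv)]
      set c : Int := (2020 - d.getD i 0) - d.getD j 0 with hc
      have hcond : ((counts.insert (d.getD j 0) (counts.getD (d.getD j 0) 0 - 1)).getD c 0 > 0)
          ↔ c ∈ d.drop (j + 1) := by
        rw [hinv']
        constructor
        · intro h; exact List.count_pos_iff.1 (by exact_mod_cast h)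
        · intro h; exact_mod_cast List.count_pos_iff.2 h
      have hwin : (d.take (d.length - 1 + 1)).drop (j + 1) = d.drop (j + 1) := by
        rw [(by omega : d.length - 1 + 1 = d.length), List.take_length]
      by_cases hmem : c ∈ d.drop (j + 1)
      · rw [if_pos (hcond.2 hmem)]
        have hj1 : j < d.length - 1 := by
          have := List.ne_nil_of_mem hmem
          have := List.length_pos_iff.2 this
          rw [List.length_drop] at this; omega
        rw [lexJ.eq_def, dif_pos hj1, hwin, if_pos hmem]
      · rw [if_neg (fun h => hmem (hcond.1 h))]
        rw [ih (j + 1) _ (by omega) hinv']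
        by_cases hj1 : j < d.length - 1
        · conv_rhs => rw [lexJ.eq_def]
          rw [dif_pos hj1, hwin, if_neg hmem]
        · conv_lhs => rw [lexJ.eq_def]
          conv_rhs => rw [lexJ.eq_def]
          rw [dif_neg (by omega : ¬ j + 1 < d.length - 1), dif_neg hj1]
    · rw [loopJB.eq_def, lexJ.eq_def,
        dif_neg hj, dif_neg (by omega : ¬ j < d.length - 1)]

lemma outer_eq {d : List Int} (hs : List.Pairwise (· ≤ ·) d) :
    ∀ fuel i, d.length - i ≤ fuel → outerA d i = loopIB d i := by
  intro fuel
  induction fuel with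
  | zero =>
    intro i hf
    rw [outerA.eq_def, loopIB.eq_def, dif_neg (by omega : ¬ i < d.length),
      dif_neg (by omega : ¬ i < d.length)]
  | succ f ih =>
    intro i hf
    by_cases hi : i < d.length
    · rw [outerA.eq_def, loopIB.eq_def]
      simp only [dif_pos hi]
      have hkey : twoPtrA d (d.getD i 0) (2020 - d.getD i 0) (i + 1) (d.length - 1)
          = loopJB d i (i + 1)
            ((d.drop (i + 1)).foldl (fun cnt x => cnt.insert x (cnt.getD x 0 + 1)) PySem.Dict.empty) := by
        rw [twoPtr_eq_lexJ hs _ _ (d.length - 1 - (i + 1)) (i + 1) (d.length - 1) le_rfl (by omega)]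
        rw [loopJB_eq_lexJ i (d.length - (i + 1)) (i + 1) _ le_rfl ?_]
        intro v
        rw [PySem.Dict.getD_foldl_insert_add_one, PySem.Dict.getD_empty]
        omega
      rw [← hkey]
      cases h : twoPtrA d (d.getD i 0) (2020 - d.getD i 0) (i + 1) (d.length - 1) with
      | some p => rfl
      | none => exact ih (i + 1) (by omega)
    · rw [outerA.eq_def, loopIB.eq_def, dif_neg hi, dif_neg hi]

-- ===== VERDICT (by name: the statement is the Claim_ definition above) =====
theorem solution_spec : Claim_equal_solution := by
  intro data result _
  show solution data result = solution_alt data result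
  unfold solution solution_alt
  have hs := PySem.List.sorted_pairwise data (fun x => x)
  exact outer_eq hs ((PySem.List.sorted data (fun x => x)).length) 0 (by omega)
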